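-- pv_equiv track=rewrite | github.com/madelsberger/if_StreamlabsParameter | if_StreamlabsParameter.py | findClosingTick
-- ===== SOURCE A (Python) =====
-- def findClosingTick(s):
--     esc = False
--     for i in range(1,len(s)):
--         if esc:
--             esc = False
--         else:
--             if s[i] == '\'':
--                 break
--             if s[i] == '\\':
--                 esc = True
--     else:
--         i = -1
--     return i
-- ===== SOURCE B (Python) =====
-- def findClosingTick(s):
--     # Pass 1: run[i] = length of the consecutive-backslash run ending at position i
--     # (position 0 counts as 0 because the scan for escapes starts at index 1).
--     run = [0]
--     prev = 0
--     for c in s[1:]: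
--         prev = prev + 1 if c == '\\' else 0
--         run.append(prev)
--     # Pass 2: the first quote whose preceding backslash run has even length is unescaped.
--     for i in range(1, len(s)):
--         if s[i] == "'" and run[i - 1] % 2 == 0:
--             return i
--     return -1
-- ===== Notes on version B (the rewrite author's own statement) =====
-- stated objective: alternative
-- what changed: Replaces A's single stateful scan (escape-flag state machine with for/else) by two staged passes: first build a table of consecutive-backslash run lengths, then return the first quote whose preceding run has even length.
import Mathlib
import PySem

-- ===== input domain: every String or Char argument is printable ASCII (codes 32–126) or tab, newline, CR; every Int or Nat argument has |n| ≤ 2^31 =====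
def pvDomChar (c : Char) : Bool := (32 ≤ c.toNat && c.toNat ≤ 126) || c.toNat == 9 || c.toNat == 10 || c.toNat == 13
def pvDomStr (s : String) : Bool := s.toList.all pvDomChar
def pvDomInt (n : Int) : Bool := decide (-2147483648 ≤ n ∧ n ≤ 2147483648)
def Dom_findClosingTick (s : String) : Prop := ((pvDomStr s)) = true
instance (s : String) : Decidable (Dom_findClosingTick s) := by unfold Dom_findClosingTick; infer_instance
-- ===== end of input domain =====

-- B replaces A's escape-flag state machine with two staged passes (a backslash-run-length
-- table, then a parity filter over the quote positions); objective: alternative.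

-- ===== PORT A =====
-- A's for-loop over range(1, len(s)) carrying the escape flag; falling off the range yields -1 (the for/else).
def pvLoopA (cs : List Char) (i : Nat) (esc : Bool) : Int :=
  if h : i < cs.length then
    if esc then pvLoopA cs (i + 1) false
    else if cs[i] = '\'' then (i : Int)
    else if cs[i] = '\\' then pvLoopA cs (i + 1) true
    else pvLoopA cs (i + 1) false
  else -1
termination_by cs.length - i

def findClosingTick (s : String) : Int := pvLoopA s.toList 1 false

-- ===== PORT B =====
-- B's pass 1: the loop 'for c in s[1:]' appending run lengths, as recursion over the index,
-- carrying prev (= run[-1]); produces the elements appended after the initial [0].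
def pvPass1 (cs : List Char) (i : Nat) (prev : Nat) : List Nat :=
  if h : i < cs.length then
    let cur := if cs[i] = '\\' then prev + 1 else 0
    cur :: pvPass1 cs (i + 1) cur
  else []
termination_by cs.length - i

def pvRunList (cs : List Char) : List Nat := 0 :: pvPass1 cs 1 0

-- B's pass 2: 'for i in range(1, len(s))' returning the first quote with even preceding run.
def pvPass2 (cs : List Char) (run : List Nat) (i : Nat) : Int :=
  if h : i < cs.length then
    if cs[i] = '\'' ∧ run.getD (i - 1) 0 % 2 = 0 then (i : Int)
    else pvPass2 cs run (i + 1)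
  else -1
termination_by cs.length - i

def findClosingTick_alt (s : String) : Int := pvPass2 s.toList (pvRunList s.toList) 1

-- ===== PRECONDITION & SPEC =====
def Spec_findClosingTick (s : String) (out : Int) : Prop := out = findClosingTick_alt s
instance (s : String) (out : Int) : Decidable (Spec_findClosingTick s out) := by unfold Spec_findClosingTick; infer_instance

-- ===== CLAIM (what is proved, stated in full; the proofs are below) =====
def Claim_equal_findClosingTick : Prop := ∀ (s : String), Dom_findClosingTick s → Spec_findClosingTick s (findClosingTick s)

-- ===== LEMMAS AND PROOFS =====

-- Mathematical run-length function: pvR cs i = length of the backslash run ending at i (scan starts at 1).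
def pvR (cs : List Char) : Nat → Nat
  | 0 => 0
  | i + 1 => if h : i + 1 < cs.length then (if cs[i + 1] = '\\' then pvR cs i + 1 else 0) else 0

-- Pass 1 computes pvR at every position from i on.
theorem pvPass1_eq (cs : List Char) (i : Nat) (hi : 1 ≤ i) :
    pvPass1 cs i (pvR cs (i - 1)) = (List.range' i (cs.length - i)).map (pvR cs) := by
  by_cases h : i < cs.length
  · rw [pvPass1]
    have hcur : (if cs[i]'h = '\\' then pvR cs (i - 1) + 1 else 0) = pvR cs i := by
      obtain ⟨j, rfl⟩ : ∃ j, i = j + 1 := ⟨i - 1, by omega⟩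
      simp [pvR, h]
    have hrange : cs.length - i = (cs.length - (i + 1)) + 1 := by omega
    simp only [h, dif_pos, hcur]
    have := pvPass1_eq cs (i + 1) (by omega)
    simp only [Nat.add_sub_cancel] at this
    rw [this, hrange, List.range'_succ]
    simp
  · rw [pvPass1]
    have : cs.length - i = 0 := by omega
    simp [h, this]
termination_by cs.length - i

theorem pvRunList_getD (cs : List Char) (j : Nat) (hj : j < cs.length ∨ j = 0) :
    (pvRunList cs).getD j 0 = pvR cs j := by
  unfold pvRunList
  cases j with
  | zero => simp [pvR]
  | succ k =>
    have hk : k + 1 < cs.length := by omega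
    have h1 : pvPass1 cs 1 0 = (List.range' 1 (cs.length - 1)).map (pvR cs) := by
      simpa [pvR] using pvPass1_eq cs 1 (le_refl 1)
    rw [h1]
    simp only [List.getD, List.getElem?_cons_succ]
    have hk' : k < cs.length - 1 := by omega
    have hr : (List.range' 1 (cs.length - 1))[k]? = some (1 + k) := by
      simp [hk']
    rw [List.getElem?_map, hr]
    simp [Nat.add_comm]

-- Key invariant: A's escape flag at position i is exactly "the run ending at i-1 is odd".
theorem pvLoopA_eq_pass2 (cs : List Char) (i : Nat) (hi : 1 ≤ i) :
    pvLoopA cs i (decide (pvR cs (i - 1) % 2 = 1)) = pvPass2 cs (pvRunList cs) i := by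
  by_cases h : i < cs.length
  · have hgetD : (pvRunList cs).getD (i - 1) 0 = pvR cs (i - 1) :=
      pvRunList_getD cs (i - 1) (by omega)
    have hRi : pvR cs i = if cs[i]'h = '\\' then pvR cs (i - 1) + 1 else 0 := by
      obtain ⟨j, rfl⟩ : ∃ j, i = j + 1 := ⟨i - 1, by omega⟩
      simp [pvR, h]
    have IH := pvLoopA_eq_pass2 cs (i + 1) (by omega)
    simp only [Nat.add_sub_cancel] at IH
    rw [pvLoopA, pvPass2]
    simp only [h, dif_pos, hgetD]
    by_cases hodd : pvR cs (i - 1) % 2 = 1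
    · -- escaped position: A skips it; B's parity test rejects any quote here.
      have hnext : pvR cs i % 2 ≠ 1 := by rw [hRi]; split_ifs <;> omega
      simp [hodd, ← IH, hnext]
    · have hz : pvR cs (i - 1) % 2 = 0 := by omega
      by_cases hq : cs[i]'h = '\''
      · simp [hq, hz]
      · by_cases hb : cs[i]'h = '\\'
        · have hp : pvR cs i % 2 = 1 := by rw [hRi, if_pos hb]; omega
          simp [hodd, hb, ← IH, hp]
        · have hp : pvR cs i % 2 ≠ 1 := by rw [hRi, if_neg hb]; omega
          simp [hodd, hq, hb, ← IH, hp]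
  · rw [pvLoopA, pvPass2]; simp [h]
termination_by cs.length - i

-- ===== VERDICT (by name: the statement is the Claim_ definition above) =====
theorem findClosingTick_spec : Claim_equal_findClosingTick := by
  intro s _
  unfold Spec_findClosingTick findClosingTick findClosingTick_alt
  have := pvLoopA_eq_pass2 s.toList 1 (le_refl 1)
  simpa [pvR] using this
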